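-- pv_equiv track=rewrite | github.com/camilodev404/ScoliosisSegmentation | notebooks/v3_local/mejoras/scripts/sync_registry_to_resultados.py | _baseline_row
-- ===== SOURCE A (Python) =====
-- def _baseline_row(rows: list[dict[str, str]]) -> dict[str, str] | None:
--     for r in rows:
--         if (r.get("id") or "").strip() == "0":
--             return r
--     for r in rows:
--         if (r.get("fase") or "").strip() == "0":
--             return r
--     return None
-- ===== SOURCE B (Python) =====
-- def _baseline_row(rows: list[dict[str, str]]) -> dict[str, str] | None:
--     fallback = None
--     for r in rows:
--         if (r.get("id") or "").strip() == "0":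
--             return r
--         if fallback is None and (r.get("fase") or "").strip() == "0":
--             fallback = r
--     return fallback
-- ===== Notes on version B (the rewrite author's own statement) =====
-- stated objective: simpler
-- what changed: Replaces A's two full passes over the rows with a single pass that returns an id-match immediately and remembers the first fase-match as a fallback.
import Mathlib
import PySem

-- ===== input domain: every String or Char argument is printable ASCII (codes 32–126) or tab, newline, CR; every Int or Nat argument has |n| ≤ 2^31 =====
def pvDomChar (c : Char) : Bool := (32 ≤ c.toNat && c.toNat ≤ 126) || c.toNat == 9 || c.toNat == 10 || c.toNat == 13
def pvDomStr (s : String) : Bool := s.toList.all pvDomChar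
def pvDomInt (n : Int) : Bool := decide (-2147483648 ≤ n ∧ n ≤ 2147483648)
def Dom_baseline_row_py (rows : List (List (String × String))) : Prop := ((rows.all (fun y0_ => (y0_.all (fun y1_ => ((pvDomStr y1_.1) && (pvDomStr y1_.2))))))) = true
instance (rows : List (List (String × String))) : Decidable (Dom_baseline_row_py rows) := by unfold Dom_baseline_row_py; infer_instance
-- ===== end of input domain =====

-- B is a single pass (return id-match at once, remember the first fase-match) instead of A's two passes; objective: simpler.

-- ===== PORT A =====
-- (r.get("id") or "").strip() == "0"  — get? misses → none, and a falsy "" also collapses to "", so getD "" is exact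
def pvIdMatch (r : List (String × String)) : Bool :=
  PySem.Str.strip ((PySem.Dict.get? (PySem.Dict.mk r) "id").getD "") == "0"

def pvFaseMatch (r : List (String × String)) : Bool :=
  PySem.Str.strip ((PySem.Dict.get? (PySem.Dict.mk r) "fase").getD "") == "0"

-- A's first loop
def pvLoopId : List (List (String × String)) → Option (List (String × String))
  | [] => none
  | r :: rs => if pvIdMatch r then some r else pvLoopId rs

-- A's second loop
def pvLoopFase : List (List (String × String)) → Option (List (String × String))
  | [] => none
  | r :: rs => if pvFaseMatch r then some r else pvLoopFase rs

def baseline_row_py (rows : List (List (String × String))) : Option (List (String × String)) :=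
  match pvLoopId rows with
  | some r => some r
  | none => pvLoopFase rows

-- ===== PORT B =====
-- B's single loop carrying the fallback accumulator
def pvLoopB : List (List (String × String)) → Option (List (String × String)) → Option (List (String × String))
  | [], fb => fb
  | r :: rs, fb =>
      if pvIdMatch r then some r
      else if fb.isNone && pvFaseMatch r then pvLoopB rs (some r)
      else pvLoopB rs fb

def baseline_row_py_alt (rows : List (List (String × String))) : Option (List (String × String)) :=
  pvLoopB rows none

-- ===== PRECONDITION & SPEC =====
def Spec_baseline_row_py (rows : List (List (String × String))) (out : Option (List (String × String))) : Prop := out = baseline_row_py_alt rows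
instance (rows : List (List (String × String))) (out : Option (List (String × String))) : Decidable (Spec_baseline_row_py rows out) := by unfold Spec_baseline_row_py; infer_instance

-- ===== CLAIM (what is proved, stated in full; the proofs are below) =====
def Claim_equal_baseline_row_py : Prop := ∀ (rows : List (List (String × String))), Dom_baseline_row_py rows → Spec_baseline_row_py rows (baseline_row_py rows)

-- ===== LEMMAS AND PROOFS =====
-- Invariant of B's loop: it yields the first id-match if any, else the carried fallback, else the first fase-match.
theorem pvLoopB_eq (rows : List (List (String × String))) :
    ∀ fb, pvLoopB rows fb =
      match pvLoopId rows with
      | some r => some r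
      | none => match fb with
                | some f => some f
                | none => pvLoopFase rows := by
  induction rows with
  | nil => intro fb; cases fb <;> rfl
  | cons r rs ih =>
      intro fb
      simp only [pvLoopB, pvLoopId, pvLoopFase]
      by_cases hid : pvIdMatch r
      · simp [hid]
      · cases fb with
        | some f => simp [hid, ih]
        | none =>
            by_cases hf : pvFaseMatch r
            · simp [hid, hf, ih]
            · simp [hid, hf, ih]

-- ===== VERDICT (by name: the statement is the Claim_ definition above) =====
theorem baseline_row_py_spec : Claim_equal_baseline_row_py := by
  intro rows _
  unfold Spec_baseline_row_py baseline_row_py baseline_row_py_alt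
  rw [pvLoopB_eq]
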